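-- pv_equiv track=rewrite | github.com/BlueStorminator/PuzToolsPythonGUI | pzt_helper.py | check_for_anagram
-- ===== SOURCE A (Python) =====
-- from typing import Generator, Any, List, Tuple, Dict
--
-- def check_for_anagram(s1: str, s2: str) -> Tuple[str, str, str, str, str]:
--     s1 = ''.join(char for char in s1.upper() if "A" <= char <= "Z")
--     s2 = ''.join(char for char in s2.upper() if "A" <= char <= "Z")
--     d1: Dict[str, int] = {}
--     d2: Dict[str, int] = {}
--     common: Dict[str, int] = {}
--     for char in s1:
--         d1[char] = d1.get(char, 0) + 1
--     for char in s2: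
--         d2[char] = d2.get(char, 0) + 1
--     for char in s1:
--         if char in d2.keys() and d2[char] > 0:
--             common[char] = common.get(char, 0) + 1
--             d2[char] = d2[char] - 1
--             d1[char] = d1[char] - 1
--     incommon: str = dict_to_list_by_value(common)
--     s1only: str = dict_to_list_by_value(d1)
--     s2only: str = dict_to_list_by_value(d2)
--     return s1, s2, incommon, s1only, s2only
--
-- def dict_to_list_by_value(d: Dict[str, int]) -> str:
--     '''
--     input = a dictionary
--     output = a string in alpha order with each dict key repeated value times
--     '''
--     result: List[str] = []
--     for key in sorted(d.keys()):
--         result.append(key * d[key])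
--     return ''.join(result)
-- ===== SOURCE B (Python) =====
-- def check_for_anagram(s1, s2):
--     f1 = ''.join(c for c in s1.upper() if 'A' <= c <= 'Z')
--     f2 = ''.join(c for c in s2.upper() if 'A' <= c <= 'Z')
--     alphabet = [chr(k) for k in range(65, 91)]
--     common = ''.join(c * min(f1.count(c), f2.count(c)) for c in alphabet)
--     s1only = ''.join(c * (f1.count(c) - min(f1.count(c), f2.count(c))) for c in alphabet)
--     s2only = ''.join(c * (f2.count(c) - min(f1.count(c), f2.count(c))) for c in alphabet)
--     return f1, f2, common, s1only, s2only
-- ===== Notes on version B (the rewrite author's own statement) =====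
-- stated objective: simpler
-- what changed: Replaces the three dict-building/decrementing loops and the sorted-key rendering helper with direct per-letter arithmetic over the fixed A-Z alphabet: common = min of the two counts, each 'only' side = count difference, rendered in one comprehension per output.
import Mathlib
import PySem

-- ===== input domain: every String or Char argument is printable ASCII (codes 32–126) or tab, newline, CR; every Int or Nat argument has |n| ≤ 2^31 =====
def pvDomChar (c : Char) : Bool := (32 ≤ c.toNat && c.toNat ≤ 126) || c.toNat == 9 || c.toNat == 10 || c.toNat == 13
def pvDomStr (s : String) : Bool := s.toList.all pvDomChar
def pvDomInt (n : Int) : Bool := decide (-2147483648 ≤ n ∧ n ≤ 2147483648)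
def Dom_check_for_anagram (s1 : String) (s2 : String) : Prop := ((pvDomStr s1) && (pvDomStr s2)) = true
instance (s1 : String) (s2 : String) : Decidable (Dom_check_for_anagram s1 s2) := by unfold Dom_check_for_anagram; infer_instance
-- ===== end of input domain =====

-- B replaces A's dict-building/decrementing loops and sorted-key rendering by per-letter
-- count arithmetic over the fixed A-Z alphabet (objective: simpler).

-- ===== PORT A =====
-- the A-Z filtering line ''.join(c for c in s.upper() if "A" <= c <= "Z"), identical in A and B
def pvFilterAZ (s : String) : List Char :=
  (PySem.Chars.upper s.toList).filter (fun c => decide ('A' ≤ c) && decide (c ≤ 'Z'))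

-- helper dict_to_list_by_value: keys in sorted order, each repeated value times, joined
def pvDictToListByValue (d : PySem.Dict Char Int) : List Char :=
  ((PySem.List.sorted d.keys (fun k => k) false).map
    (fun k => PySem.List.pyRepeat [k] (d.getD k 0))).flatten

-- one step of A's third loop; st = (d1, d2, common)
def pvCommonStep (st : PySem.Dict Char Int × PySem.Dict Char Int × PySem.Dict Char Int)
    (c : Char) : PySem.Dict Char Int × PySem.Dict Char Int × PySem.Dict Char Int :=
  if st.2.1.contains c && decide (0 < st.2.1.getD c 0) then
    (st.1.insert c (st.1.getD c 0 - 1),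
     st.2.1.insert c (st.2.1.getD c 0 - 1),
     st.2.2.insert c (st.2.2.getD c 0 + 1))
  else st

def check_for_anagram (s1 : String) (s2 : String) : String × String × String × String × String :=
  let f1 := pvFilterAZ s1
  let f2 := pvFilterAZ s2
  let d1 := f1.foldl (fun d c => d.insert c (d.getD c 0 + 1)) PySem.Dict.empty
  let d2 := f2.foldl (fun d c => d.insert c (d.getD c 0 + 1)) PySem.Dict.empty
  let t := f1.foldl pvCommonStep (d1, d2, PySem.Dict.empty)
  (String.ofList f1, String.ofList f2, String.ofList (pvDictToListByValue t.2.2), String.ofList (pvDictToListByValue t.1), String.ofList (pvDictToListByValue t.2.1))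

-- ===== PORT B =====
-- alphabet = [chr(k) for k in range(65, 91)]
def pvAlphabet : List Char := (PySem.List.pyRange 65 91 1).map (fun k => Char.ofNat k.toNat)

def check_for_anagram_alt (s1 : String) (s2 : String) : String × String × String × String × String :=
  let f1 := pvFilterAZ s1
  let f2 := pvFilterAZ s2
  let common := (pvAlphabet.map (fun c =>
    PySem.List.pyRepeat [c] (min (f1.count c : Int) (f2.count c : Int)))).flatten
  let s1only := (pvAlphabet.map (fun c =>
    PySem.List.pyRepeat [c] ((f1.count c : Int) - min (f1.count c : Int) (f2.count c : Int)))).flatten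
  let s2only := (pvAlphabet.map (fun c =>
    PySem.List.pyRepeat [c] ((f2.count c : Int) - min (f1.count c : Int) (f2.count c : Int)))).flatten
  (String.ofList f1, String.ofList f2, String.ofList common, String.ofList s1only, String.ofList s2only)

-- ===== PRECONDITION & SPEC =====
def Spec_check_for_anagram (s1 : String) (s2 : String) (out : String × String × String × String × String) : Prop := out = check_for_anagram_alt s1 s2
instance (s1 : String) (s2 : String) (out : String × String × String × String × String) : Decidable (Spec_check_for_anagram s1 s2 out) := by unfold Spec_check_for_anagram; infer_instance

-- ===== CLAIM (what is proved, stated in full; the proofs are below) =====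
def Claim_equal_check_for_anagram : Prop := ∀ (s1 : String) (s2 : String), Dom_check_for_anagram s1 s2 → Spec_check_for_anagram s1 s2 (check_for_anagram s1 s2)

-- ===== LEMMAS AND PROOFS =====

lemma pvAlphabet_eq : pvAlphabet =
    ['A','B','C','D','E','F','G','H','I','J','K','L','M',
     'N','O','P','Q','R','S','T','U','V','W','X','Y','Z'] := by decide

lemma mem_pvAlphabet (c : Char) : c ∈ pvAlphabet ↔ ('A' ≤ c ∧ c ≤ 'Z') := by
  constructor
  · intro h
    rw [pvAlphabet_eq] at h
    fin_cases h <;> exact ⟨by decide, by decide⟩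
  · rintro ⟨h1, h2⟩
    refine List.mem_map.mpr ⟨(c.toNat : Int), ?_, ?_⟩
    · have hA : 65 ≤ c.toNat := by simpa [Char.le_def, UInt32.le_iff_toNat_le] using h1
      have hZ : c.toNat ≤ 90 := by simpa [Char.le_def, UInt32.le_iff_toNat_le] using h2
      exact PySem.List.mem_pyRange_one.mpr (by omega)
    · simp [Char.ofNat_toNat]

lemma mem_pvFilterAZ (s : String) : ∀ c ∈ pvFilterAZ s, 'A' ≤ c ∧ c ≤ 'Z' := by
  intro c hc
  simp only [pvFilterAZ, List.mem_filter, Bool.and_eq_true, decide_eq_true_eq] at hc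
  exact hc.2

lemma pvFlatten_map_eq_of_sublist {α β : Type} (f : α → List β) :
    ∀ {xs ys : List α}, xs.Sublist ys → ys.Nodup →
    (∀ y ∈ ys, y ∉ xs → f y = []) → (ys.map f).flatten = (xs.map f).flatten := by
  intro xs ys h
  induction h with
  | slnil => intro _ _; rfl
  | @cons l₁ l₂ a h ih =>
      intro hnd hz
      have ha : a ∉ l₁ := fun hx => (List.nodup_cons.mp hnd).1 (h.subset hx)
      simp only [List.map_cons, List.flatten_cons,
        hz a (List.mem_cons_self) ha, List.nil_append]
      exact ih (List.nodup_cons.mp hnd).2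
        (fun y hy hyx => hz y (List.mem_cons_of_mem _ hy) hyx)
  | @cons₂ l₁ l₂ a h ih =>
      intro hnd hz
      simp only [List.map_cons, List.flatten_cons]
      congr 1
      exact ih (List.nodup_cons.mp hnd).2
        (fun y hy hyx => hz y (List.mem_cons_of_mem _ hy)
          (fun hm => by
            rcases List.mem_cons.mp hm with rfl | hm'
            · exact (List.nodup_cons.mp hnd).1 hy
            · exact hyx hm'))

lemma pvRender_eq (d : PySem.Dict Char Int) (hnd : d.keys.Nodup)
    (hsub : ∀ k ∈ d.keys, 'A' ≤ k ∧ k ≤ 'Z') :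
    pvDictToListByValue d =
      (pvAlphabet.map (fun c => PySem.List.pyRepeat [c] (d.getD c 0))).flatten := by
  unfold pvDictToListByValue
  have hperm : (PySem.List.sorted d.keys (fun k => k) false).Perm d.keys :=
    PySem.List.sorted_perm d.keys (fun k => k) false
  have hndks : (PySem.List.sorted d.keys (fun k => k) false).Nodup := hperm.nodup_iff.mpr hnd
  have hpw : (PySem.List.sorted d.keys (fun k => k) false).Pairwise (· ≤ ·) :=
    PySem.List.sorted_pairwise d.keys (fun k => k)
  have hApw : pvAlphabet.Pairwise (· ≤ ·) := by rw [pvAlphabet_eq]; decide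
  have hAnd : pvAlphabet.Nodup := by rw [pvAlphabet_eq]; decide
  have hsubl : (PySem.List.sorted d.keys (fun k => k) false).Sublist pvAlphabet := by
    refine List.sublist_of_subperm_of_pairwise ?_ hpw hApw
    refine List.subperm_of_subset hndks ?_
    intro x hx
    exact (mem_pvAlphabet x).mpr (hsub x (hperm.mem_iff.mp hx))
  refine (pvFlatten_map_eq_of_sublist _ hsubl hAnd ?_).symm
  intro y _ hy
  have hyk : y ∉ d.keys := fun hk => hy (hperm.mem_iff.mpr hk)
  have hc : d.contains y = false := by
    have := PySem.Dict.contains_iff_mem_keys (d := d) (k := y)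
    cases h : d.contains y
    · rfl
    · exact absurd (this.mp h) hyk
  rw [PySem.Dict.getD_of_not_contains _ _ hc]
  simp [PySem.List.pyRepeat_singleton]

-- the invariant of A's third loop, over the remaining suffix l (prefix p already processed)
lemma pvLoop (f2 : List Char) : ∀ (l p : List Char)
    (d1 d2 com : PySem.Dict Char Int),
    (∀ c, d1.getD c 0 = ((p ++ l).count c : Int) - min (p.count c : Int) (f2.count c : Int)) →
    (∀ c, d2.getD c 0 = (f2.count c : Int) - min (p.count c : Int) (f2.count c : Int)) →
    (∀ c, com.getD c 0 = min (p.count c : Int) (f2.count c : Int)) →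
    (∀ c, d2.contains c = decide (c ∈ f2)) →
    d1.keys.Nodup → d2.keys.Nodup → com.keys.Nodup →
    (∀ k ∈ d1.keys, k ∈ p ++ l) → (∀ k ∈ d2.keys, k ∈ f2) → (∀ k ∈ com.keys, k ∈ p) →
    (∀ c, (l.foldl pvCommonStep (d1, d2, com)).1.getD c 0 =
        ((p ++ l).count c : Int) - min ((p ++ l).count c : Int) (f2.count c : Int)) ∧
    (∀ c, (l.foldl pvCommonStep (d1, d2, com)).2.1.getD c 0 =
        (f2.count c : Int) - min ((p ++ l).count c : Int) (f2.count c : Int)) ∧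
    (∀ c, (l.foldl pvCommonStep (d1, d2, com)).2.2.getD c 0 =
        min ((p ++ l).count c : Int) (f2.count c : Int)) ∧
    (l.foldl pvCommonStep (d1, d2, com)).1.keys.Nodup ∧
    (l.foldl pvCommonStep (d1, d2, com)).2.1.keys.Nodup ∧
    (l.foldl pvCommonStep (d1, d2, com)).2.2.keys.Nodup ∧
    (∀ k ∈ (l.foldl pvCommonStep (d1, d2, com)).1.keys, k ∈ p ++ l) ∧
    (∀ k ∈ (l.foldl pvCommonStep (d1, d2, com)).2.1.keys, k ∈ f2) ∧
    (∀ k ∈ (l.foldl pvCommonStep (d1, d2, com)).2.2.keys, k ∈ p ++ l) := by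
  intro l
  induction l with
  | nil =>
      intro p d1 d2 com hd1 hd2 hcom _ hn1 hn2 hn3 hk1 hk2 hk3
      simp only [List.foldl_nil, List.append_nil] at *
      exact ⟨hd1, hd2, hcom, hn1, hn2, hn3, hk1, hk2, hk3⟩
  | cons c l' ih =>
      intro p d1 d2 com hd1 hd2 hcom hcont hn1 hn2 hn3 hk1 hk2 hk3
      rw [List.foldl_cons]
      have happ : (p ++ [c]) ++ l' = p ++ c :: l' := by simp
      by_cases hc : (d2.contains c && decide (0 < d2.getD c 0)) = true
      · -- common branch taken
        have hmem : c ∈ f2 := by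
          have := (Bool.and_eq_true _ _).mp hc |>.1
          rw [hcont c] at this; exact of_decide_eq_true this
        have hpos : 0 < d2.getD c 0 :=
          of_decide_eq_true ((Bool.and_eq_true _ _).mp hc |>.2)
        rw [hd2 c] at hpos
        have hstep : pvCommonStep (d1, d2, com) c =
            (d1.insert c (d1.getD c 0 - 1), d2.insert c (d2.getD c 0 - 1),
             com.insert c (com.getD c 0 + 1)) := by
          simp only [pvCommonStep, hc, if_true]
        rw [hstep]
        have := ih (p ++ [c]) (d1.insert c (d1.getD c 0 - 1))
          (d2.insert c (d2.getD c 0 - 1)) (com.insert c (com.getD c 0 + 1))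
          (by
            intro c'
            rw [PySem.Dict.getD_insert, happ]
            by_cases hcc : c' = c
            · subst hcc
              rw [if_pos rfl, hd1 c']
              simp [List.count_append, List.count_cons] at *
              omega
            · have hcc' : ¬ c = c' := fun h => hcc h.symm
              rw [if_neg hcc, hd1 c']
              simp [List.count_append, hcc'])
          (by
            intro c'
            rw [PySem.Dict.getD_insert]
            by_cases hcc : c' = c
            · subst hcc
              rw [if_pos rfl, hd2 c']
              simp [List.count_append, List.count_cons] at *
              omega
            · have hcc' : ¬ c = c' := fun h => hcc h.symm
              rw [if_neg hcc, hd2 c']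
              simp [List.count_append, hcc'])
          (by
            intro c'
            rw [PySem.Dict.getD_insert]
            by_cases hcc : c' = c
            · subst hcc
              rw [if_pos rfl, hcom c']
              simp [List.count_append, List.count_cons] at *
              omega
            · have hcc' : ¬ c = c' := fun h => hcc h.symm
              rw [if_neg hcc, hcom c']
              simp [List.count_append, hcc'])
          (by
            intro c'
            rw [PySem.Dict.contains_insert]
            by_cases hcc : c' = c
            · subst hcc; simp [hmem]
            · simp [hcc, hcont c'])
          (PySem.Dict.nodup_keys_insert _ _ _ hn1)
          (PySem.Dict.nodup_keys_insert _ _ _ hn2)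
          (PySem.Dict.nodup_keys_insert _ _ _ hn3)
          (by
            intro k hk
            rw [happ]
            rw [PySem.Dict.mem_keys_insert] at hk
            rcases hk with rfl | hk'
            · exact List.mem_append_right _ (List.mem_cons_self)
            · exact hk1 k hk')
          (by
            intro k hk
            rw [PySem.Dict.mem_keys_insert] at hk
            rcases hk with rfl | hk'
            · exact hmem
            · exact hk2 k hk')
          (by
            intro k hk
            rw [PySem.Dict.mem_keys_insert] at hk
            rcases hk with rfl | hk'
            · exact List.mem_append_right _ (List.mem_singleton_self _)
            · exact List.mem_append_left _ (hk3 k hk'))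
        rw [happ] at this
        exact this
      · -- branch not taken: state unchanged
        have hstep : pvCommonStep (d1, d2, com) c = (d1, d2, com) := by
          simp [pvCommonStep, hc]
        rw [hstep]
        have hnc : ¬ (d2.contains c = true ∧ 0 < d2.getD c 0) := by
          rintro ⟨h1, h2⟩
          exact hc (by simp [h1, h2])
        have hmin : ∀ c', min (((p ++ [c]).count c' : Nat) : Int) (f2.count c' : Int) =
            min ((p.count c' : Nat) : Int) (f2.count c' : Int) := by
          intro c'
          by_cases hcc : c' = c
          · subst hcc
            rcases not_and_or.mp hnc with h | h
            · have hne : c' ∉ f2 := by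
                rw [hcont c'] at h
                simpa using h
              have h0 : f2.count c' = 0 := List.count_eq_zero.mpr hne
              rw [h0]
              push_cast
              omega
            · have hle : d2.getD c' 0 ≤ 0 := not_lt.mp h
              rw [hd2 c'] at hle
              simp [List.count_append, List.count_cons] at *
              omega
          · have hcc' : ¬ c = c' := fun h => hcc h.symm
            simp [List.count_append, hcc']
        have := ih (p ++ [c]) d1 d2 com
          (by intro c'; rw [happ, hmin c']; exact hd1 c')
          (by intro c'; rw [hmin c']; exact hd2 c')
          (by intro c'; rw [hmin c']; exact hcom c')
          hcont hn1 hn2 hn3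
          (by intro k hk; rw [happ]; exact hk1 k hk)
          hk2
          (by intro k hk; exact List.mem_append_left _ (hk3 k hk))
        rw [happ] at this
        exact this

lemma pvInit_getD (f : List Char) (c : Char) :
    (f.foldl (fun d c => d.insert c (d.getD c 0 + 1)) (PySem.Dict.empty : PySem.Dict Char Int)).getD c 0 =
      (f.count c : Int) := by
  rw [PySem.Dict.getD_foldl_insert_add_one]
  simp [PySem.Dict.getD_empty]

lemma pvInit_keys (f : List Char) :
    (f.foldl (fun d c => d.insert c (d.getD c 0 + 1)) (PySem.Dict.empty : PySem.Dict Char Int)).keys =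
      PySem.Set.ofList f := by
  rw [PySem.Dict.keys_foldl_insert]
  simp [PySem.Dict.keys_empty]
  rfl

lemma pvInit_nodup (f : List Char) :
    (f.foldl (fun d c => d.insert c (d.getD c 0 + 1)) (PySem.Dict.empty : PySem.Dict Char Int)).keys.Nodup := by
  exact PySem.Dict.nodup_keys_foldl_insert _ _ _ PySem.Dict.nodup_keys_empty

-- ===== VERDICT (by name: the statement is the Claim_ definition above) =====
theorem check_for_anagram_spec : Claim_equal_check_for_anagram := by
  intro s1 s2 _
  unfold Spec_check_for_anagram check_for_anagram check_for_anagram_alt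
  dsimp only []
  set f1 := pvFilterAZ s1 with hf1
  set f2 := pvFilterAZ s2 with hf2
  set d1 := f1.foldl (fun d c => d.insert c (d.getD c 0 + 1)) (PySem.Dict.empty : PySem.Dict Char Int) with hd1
  set d2 := f2.foldl (fun d c => d.insert c (d.getD c 0 + 1)) (PySem.Dict.empty : PySem.Dict Char Int) with hd2
  obtain ⟨A1, A2, A3, N1, N2, N3, K1, K2, K3⟩ :=
    pvLoop f2 f1 [] d1 d2 PySem.Dict.empty
      (by
        intro c
        rw [hd1, pvInit_getD]
        simp)
      (by
        intro c
        rw [hd2, pvInit_getD]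
        simp)
      (by
        intro c
        simp [PySem.Dict.getD_empty])
      (by
        intro c
        rw [hd2, PySem.Dict.contains_eq_decide_mem_keys, pvInit_keys]
        simp [PySem.Set.mem_ofList])
      (by rw [hd1]; exact pvInit_nodup f1)
      (by rw [hd2]; exact pvInit_nodup f2)
      (by simp [PySem.Dict.keys_empty])
      (by
        intro k hk
        rw [hd1, pvInit_keys] at hk
        rw [PySem.Set.mem_ofList] at hk
        simpa using hk)
      (by
        intro k hk
        rw [hd2, pvInit_keys] at hk
        rw [PySem.Set.mem_ofList] at hk
        exact hk)
      (by simp [PySem.Dict.keys_empty])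
  simp only [List.nil_append] at A1 A2 A3 K1 K3
  have E3 : pvDictToListByValue (f1.foldl pvCommonStep (d1, d2, PySem.Dict.empty)).2.2 =
      (pvAlphabet.map (fun c =>
        PySem.List.pyRepeat [c] (min (f1.count c : Int) (f2.count c : Int)))).flatten := by
    rw [pvRender_eq _ N3 (fun k hk => mem_pvFilterAZ s1 k (K3 k hk))]
    congr 1
    refine List.map_congr_left (fun c _ => ?_)
    rw [A3 c]
  have E4 : pvDictToListByValue (f1.foldl pvCommonStep (d1, d2, PySem.Dict.empty)).1 =
      (pvAlphabet.map (fun c =>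
        PySem.List.pyRepeat [c] ((f1.count c : Int) - min (f1.count c : Int) (f2.count c : Int)))).flatten := by
    rw [pvRender_eq _ N1 (fun k hk => mem_pvFilterAZ s1 k (K1 k hk))]
    congr 1
    refine List.map_congr_left (fun c _ => ?_)
    rw [A1 c]
  have E5 : pvDictToListByValue (f1.foldl pvCommonStep (d1, d2, PySem.Dict.empty)).2.1 =
      (pvAlphabet.map (fun c =>
        PySem.List.pyRepeat [c] ((f2.count c : Int) - min (f1.count c : Int) (f2.count c : Int)))).flatten := by
    rw [pvRender_eq _ N2 (fun k hk => mem_pvFilterAZ s2 k (K2 k hk))]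
    congr 1
    refine List.map_congr_left (fun c _ => ?_)
    rw [A2 c]
  rw [E3, E4, E5]
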